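-- pv_equiv track=rewrite | github.com/marekrydlewski/wumpus-uncertain | wumpus.py | get_breeze_checked
-- ===== SOURCE A (Python) =====
-- def get_neighbors_pos(pos):
--     i, j = pos
--     return [(i - 1, j), (i + 1, j), (i, j + 1), (i, j - 1)]
--
-- def get_breeze_checked(breeze, traps, front):
--     breeze_checked = {b: False for b in breeze}
--     for i, trap in enumerate(traps):
--         if trap:
--             neigh = get_neighbors_pos(front[i])
--             for n in neigh:
--                 if n in breeze_checked:
--                     breeze_checked[n] = True
--
--     for k, v in breeze_checked.items():
--         if not v:
--             return False
--     return True
-- ===== SOURCE B (Python) =====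
-- def get_neighbors_pos(pos):
--     i, j = pos
--     return [(i - 1, j), (i + 1, j), (i, j + 1), (i, j - 1)]
--
-- def get_breeze_checked(breeze, traps, front):
--     trap_pos = {p for t, p in zip(traps, front) if t}
--     return all(any(n in trap_pos for n in get_neighbors_pos(b))
--                for b in breeze)
-- ===== Notes on version B (the rewrite author's own statement) =====
-- stated objective: idiomatic
-- what changed: B reverses the traversal: instead of iterating over traps and marking breeze cells in a mutable checked-dict, it builds a set of active trap positions once and checks that every breeze cell has a neighbour in that set.
import Mathlib
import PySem

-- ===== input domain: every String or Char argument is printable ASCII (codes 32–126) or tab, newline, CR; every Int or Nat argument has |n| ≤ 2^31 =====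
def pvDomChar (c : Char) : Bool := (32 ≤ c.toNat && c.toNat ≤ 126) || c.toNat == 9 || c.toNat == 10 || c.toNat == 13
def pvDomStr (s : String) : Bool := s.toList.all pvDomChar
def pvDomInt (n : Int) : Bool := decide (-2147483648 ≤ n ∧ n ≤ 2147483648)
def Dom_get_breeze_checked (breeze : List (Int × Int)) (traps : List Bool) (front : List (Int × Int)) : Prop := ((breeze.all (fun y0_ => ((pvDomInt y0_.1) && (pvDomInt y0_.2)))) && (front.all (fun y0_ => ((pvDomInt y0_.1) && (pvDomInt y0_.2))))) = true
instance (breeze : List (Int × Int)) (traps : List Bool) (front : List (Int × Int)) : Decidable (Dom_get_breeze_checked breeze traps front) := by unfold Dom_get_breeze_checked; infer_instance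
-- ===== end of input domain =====

-- B reverses the traversal: a set of active trap positions is built once and every breeze
-- cell is checked to have a neighbour in it, instead of A's trap-by-trap marking of a
-- mutable checked-dict (objective: idiomatic; same asymptotic cost).

-- ===== PORT A =====
-- shared module-level helper of both Pythons
def get_neighbors_pos (pos : Int × Int) : List (Int × Int) :=
  [(pos.1 - 1, pos.2), (pos.1 + 1, pos.2), (pos.1, pos.2 + 1), (pos.1, pos.2 - 1)]

def get_breeze_checked (breeze : List (Int × Int)) (traps : List Bool) (front : List (Int × Int)) : Bool :=
  -- breeze_checked = {b: False for b in breeze}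
  let bc0 : PySem.Dict (Int × Int) Bool :=
    breeze.foldl (fun d b => d.insert b false) PySem.Dict.empty
  -- for i, trap in enumerate(traps): if trap: for n in get_neighbors_pos(front[i]): if n in bc: bc[n] = True
  let bc : PySem.Dict (Int × Int) Bool :=
    (PySem.List.enumerate traps 0).foldl (fun d it =>
      if it.2 then
        match PySem.List.pyGet? front it.1 with
        | some p => (get_neighbors_pos p).foldl
            (fun d n => if d.contains n then d.insert n true else d) d
        | none => d  -- front[i] raises IndexError in Python; these inputs are outside Pre_
      else d) bc0
  -- for k, v in bc.items(): if not v: return False; return True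
  bc.items.all (fun kv => kv.2)

-- ===== PORT B =====
def get_breeze_checked_alt (breeze : List (Int × Int)) (traps : List Bool) (front : List (Int × Int)) : Bool :=
  -- trap_pos = {p for t, p in zip(traps, front) if t}
  let trap_pos : PySem.Set (Int × Int) :=
    PySem.Set.ofList (((traps.zip front).filter (fun tp => tp.1)).map (fun tp => tp.2))
  -- all(any(n in trap_pos for n in get_neighbors_pos(b)) for b in breeze)
  breeze.all (fun b => (get_neighbors_pos b).any (fun n => trap_pos.contains n))

-- ===== PRECONDITION & SPEC =====
-- Pre_ is exactly A's return domain: A evaluates front[i] for every active trap index i,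
-- raising IndexError when such an i is out of range of front.
def Pre_get_breeze_checked (breeze : List (Int × Int)) (traps : List Bool) (front : List (Int × Int)) : Prop :=
  ∀ i < traps.length, traps.getD i false = true → i < front.length
instance (breeze : List (Int × Int)) (traps : List Bool) (front : List (Int × Int)) : Decidable (Pre_get_breeze_checked breeze traps front) := by unfold Pre_get_breeze_checked; infer_instance

def pvWitness_get_breeze_checked : (List (Int × Int)) × List Bool × (List (Int × Int)) :=
  ([(0, 1)], [true], [(0, 0)])

def Spec_get_breeze_checked (breeze : List (Int × Int)) (traps : List Bool) (front : List (Int × Int)) (out : Bool) : Prop := out = get_breeze_checked_alt breeze traps front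
instance (breeze : List (Int × Int)) (traps : List Bool) (front : List (Int × Int)) (out : Bool) : Decidable (Spec_get_breeze_checked breeze traps front out) := by unfold Spec_get_breeze_checked; infer_instance

-- ===== CLAIM (what is proved, stated in full; the proofs are below) =====
def Claim_equal_get_breeze_checked : Prop := ∀ (breeze : List (Int × Int)) (traps : List Bool) (front : List (Int × Int)), Dom_get_breeze_checked breeze traps front → Pre_get_breeze_checked breeze traps front → Spec_get_breeze_checked breeze traps front (get_breeze_checked breeze traps front)
-- ===== LEMMAS AND PROOFS =====

-- the neighbour relation is symmetric: this is what lets B look outward from breeze cells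
theorem neigh_symm (a b : Int × Int) : a ∈ get_neighbors_pos b ↔ b ∈ get_neighbors_pos a := by
  obtain ⟨a1, a2⟩ := a; obtain ⟨b1, b2⟩ := b
  simp [get_neighbors_pos, Prod.ext_iff]
  omega

-- A's inner marking loop: the key set of the dict is untouched
theorem inner_contains (ns : List (Int × Int)) (d : PySem.Dict (Int × Int) Bool) (x : Int × Int) :
    ((ns.foldl (fun d n => if d.contains n then d.insert n true else d) d).contains x) = d.contains x := by
  induction ns generalizing d with
  | nil => rfl
  | cons n ns ih =>
    simp only [List.foldl_cons]
    by_cases h : d.contains n = true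
    · rw [if_pos h, ih, PySem.Dict.contains_insert]
      by_cases hx : x = n
      · subst hx; simp [h]
      · simp [hx]
    · rw [if_neg h, ih]

-- A's inner marking loop: effect on one stored value
theorem inner_getD (ns : List (Int × Int)) (d : PySem.Dict (Int × Int) Bool) (b : Int × Int) :
    ((ns.foldl (fun d n => if d.contains n then d.insert n true else d) d).getD b false)
      = (d.getD b false || (d.contains b && ns.contains b)) := by
  induction ns generalizing d with
  | nil => simp
  | cons n ns ih =>
    simp only [List.foldl_cons, List.contains_cons]
    by_cases h : d.contains n = true
    · rw [if_pos h, ih]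
      by_cases hx : b = n
      · subst hx
        simp [PySem.Dict.getD_insert_self, h]
      · have hbn : (b == n) = false := beq_eq_false_iff_ne.mpr hx
        simp [PySem.Dict.getD_insert, PySem.Dict.contains_insert, hx, hbn]
    · rw [if_neg h, ih]
      by_cases hx : b = n
      · subst hx; simp [h]
      · have : (b == n) = false := beq_eq_false_iff_ne.mpr hx
        simp [this]

theorem inner_keys (ns : List (Int × Int)) (d : PySem.Dict (Int × Int) Bool) :
    ((ns.foldl (fun d n => if d.contains n then d.insert n true else d) d).keys) = d.keys := by
  induction ns generalizing d with
  | nil => rfl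
  | cons n ns ih =>
    simp only [List.foldl_cons]
    by_cases h : d.contains n = true
    · rw [if_pos h, ih]
      simp [pysem, h]
    · rw [if_neg h, ih]

-- the per-breeze-cell test A's trap loop effectively computes
def hitA (traps : List Bool) (front : List (Int × Int)) (b : Int × Int) : Bool :=
  (PySem.List.enumerate traps 0).any (fun it =>
    it.2 && (match PySem.List.pyGet? front it.1 with
             | some p => (get_neighbors_pos p).contains b
             | none => false))

theorem outer_getD (front : List (Int × Int)) (es : List (Int × Bool))
    (d : PySem.Dict (Int × Int) Bool) (b : Int × Int) :
    ((es.foldl (fun d it =>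
      if it.2 then
        match PySem.List.pyGet? front it.1 with
        | some p => (get_neighbors_pos p).foldl
            (fun d n => if d.contains n then d.insert n true else d) d
        | none => d
      else d) d).getD b false)
    = (d.getD b false || (d.contains b && es.any (fun it =>
        it.2 && (match PySem.List.pyGet? front it.1 with
                 | some p => (get_neighbors_pos p).contains b
                 | none => false)))) := by
  induction es generalizing d with
  | nil => simp
  | cons e es ih =>
    simp only [List.foldl_cons, List.any_cons]
    by_cases ht : e.2 = true
    · rw [if_pos ht, ht]
      cases hg : PySem.List.pyGet? front e.1 with
      | none => simp only [ih]; simp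
      | some p =>
        rw [ih, inner_getD, inner_contains]
        simp only [Bool.true_and, Bool.and_or_distrib_left, ← Bool.or_assoc]
    · rw [if_neg ht]
      simp only [Bool.not_eq_true] at ht
      rw [ht, ih]
      simp

theorem outer_keys (front : List (Int × Int)) (es : List (Int × Bool))
    (d : PySem.Dict (Int × Int) Bool) :
    ((es.foldl (fun d it =>
      if it.2 then
        match PySem.List.pyGet? front it.1 with
        | some p => (get_neighbors_pos p).foldl
            (fun d n => if d.contains n then d.insert n true else d) d
        | none => d
      else d) d).keys) = d.keys := by
  induction es generalizing d with
  | nil => rfl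
  | cons e es ih =>
    simp only [List.foldl_cons]
    by_cases ht : e.2 = true
    · rw [if_pos ht]
      cases hg : PySem.List.pyGet? front e.1 with
      | none => simp only [ih]
      | some p => simp only [ih, inner_keys]
    · rw [if_neg ht, ih]

-- the initial all-False dict
theorem bc0_getD (l : List (Int × Int)) (d : PySem.Dict (Int × Int) Bool) (x : Int × Int)
    (h : d.getD x false = false) :
    ((l.foldl (fun d b => d.insert b false) d).getD x false) = false := by
  induction l generalizing d with
  | nil => exact h
  | cons a l ih =>
    simp only [List.foldl_cons]
    exact ih _ (by by_cases hx : x = a <;> simp [PySem.Dict.getD_insert, hx, h])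

theorem bc0_mem_keys (l : List (Int × Int)) (d : PySem.Dict (Int × Int) Bool) (x : Int × Int) :
    x ∈ (l.foldl (fun d b => d.insert b false) d).keys ↔ x ∈ d.keys ∨ x ∈ l := by
  induction l generalizing d with
  | nil => simp
  | cons a l ih =>
    simp only [List.foldl_cons, ih, PySem.Dict.mem_keys_insert, List.mem_cons]
    tauto

theorem bc0_nodup (l : List (Int × Int)) :
    ((l.foldl (fun d b => d.insert b false) PySem.Dict.empty).keys).Nodup :=
  PySem.Dict.nodup_keys_foldl_insert l (fun _ _ => false) _ PySem.Dict.nodup_keys_empty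

-- A's final loop over items, as a statement about keys
theorem dict_all_snd (d : PySem.Dict (Int × Int) Bool) (hnd : d.keys.Nodup) :
    (d.items.all (fun kv => kv.2) = true) ↔ ∀ k ∈ d.keys, d.getD k false = true := by
  simp only [List.all_eq_true, PySem.Dict.keys, List.mem_map]
  constructor
  · rintro h k ⟨⟨k', v⟩, hkv, rfl⟩
    rw [PySem.Dict.getD_of_mem_items d hkv hnd]
    exact h _ hkv
  · intro h kv hkv
    have hg := PySem.Dict.getD_of_mem_items d (show (kv.1, kv.2) ∈ d.items from hkv) hnd false
    rw [← hg]
    exact h kv.1 ⟨kv, hkv, rfl⟩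

theorem A_char (breeze : List (Int × Int)) (traps : List Bool) (front : List (Int × Int)) :
    (get_breeze_checked breeze traps front = true) ↔ ∀ b ∈ breeze, hitA traps front b = true := by
  unfold get_breeze_checked
  set bc0 := breeze.foldl (fun d b => d.insert b false) PySem.Dict.empty with hbc0
  set bc := (PySem.List.enumerate traps 0).foldl (fun d it =>
      if it.2 then
        match PySem.List.pyGet? front it.1 with
        | some p => (get_neighbors_pos p).foldl
            (fun d n => if d.contains n then d.insert n true else d) d
        | none => d
      else d) bc0 with hbc
  have hkeys : bc.keys = bc0.keys := outer_keys front _ bc0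
  have hnd : bc.keys.Nodup := by rw [hkeys, hbc0]; exact bc0_nodup breeze
  have hmem0 : ∀ x, x ∈ bc0.keys ↔ x ∈ breeze := by
    intro x
    rw [hbc0, bc0_mem_keys, PySem.Dict.keys_empty]
    simp
  have hget : ∀ b, bc.getD b false = (bc0.contains b && hitA traps front b) := by
    intro b
    rw [hbc, outer_getD, hbc0, bc0_getD _ _ _ (PySem.Dict.getD_empty b false)]
    rw [Bool.false_or, hitA]
  rw [dict_all_snd bc hnd]
  constructor
  · intro h b hb
    have hk : b ∈ bc.keys := by rw [hkeys]; exact (hmem0 b).mpr hb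
    have := h b hk
    rw [hget b] at this
    exact ((Bool.and_eq_true _ _).mp this).2
  · intro h k hk
    rw [hget k]
    have hb : k ∈ breeze := (hmem0 k).mp (by rw [← hkeys]; exact hk)
    have hc : bc0.contains k = true := (PySem.Dict.contains_iff_mem_keys bc0 k).mpr ((hmem0 k).mpr hb)
    rw [hc, h k hb]
    rfl

theorem hitA_iff (traps : List Bool) (front : List (Int × Int)) (b : Int × Int)
    (hpre : ∀ i < traps.length, traps.getD i false = true → i < front.length) :
    (hitA traps front b = true) ↔
      ∃ tp ∈ traps.zip front, tp.1 = true ∧ b ∈ get_neighbors_pos tp.2 := by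
  rw [hitA, List.any_eq_true]
  constructor
  · rintro ⟨it, hit, hpred⟩
    obtain ⟨k, hk, rfl⟩ := (PySem.List.mem_enumerate_iff traps 0 it).mp hit
    simp only [zero_add] at hpred
    obtain ⟨ht, hmatch⟩ := (Bool.and_eq_true _ _).mp hpred
    have hf : k < front.length := hpre k hk (by rw [List.getD_eq_getElem _ _ hk]; exact ht)
    rw [PySem.List.pyGet?_natCast, List.getElem?_eq_getElem hf] at hmatch
    refine ⟨(traps[k], front[k]), ?_, ht, ?_⟩
    · have hkz : k < (traps.zip front).length := by simp [List.length_zip]; omega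
      have : (traps.zip front)[k] = (traps[k], front[k]) := List.getElem_zip (h := hkz)
      rw [← this]
      exact List.getElem_mem hkz
    · simpa using hmatch
  · rintro ⟨tp, htp, ht, hnb⟩
    obtain ⟨k, hkz, rfl⟩ := List.mem_iff_getElem.mp htp
    have hkt : k < traps.length := by simp [List.length_zip] at hkz; omega
    have hkf : k < front.length := by simp [List.length_zip] at hkz; omega
    rw [List.getElem_zip] at ht hnb
    refine ⟨((k : Int), traps[k]), ?_, ?_⟩
    · exact (PySem.List.mem_enumerate_iff traps 0 _).mpr ⟨k, hkt, by simp⟩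
    · rw [PySem.List.pyGet?_natCast, List.getElem?_eq_getElem hkf]
      simp only [Bool.and_eq_true]
      exact ⟨ht, by simpa using hnb⟩

theorem B_char (breeze : List (Int × Int)) (traps : List Bool) (front : List (Int × Int)) :
    (get_breeze_checked_alt breeze traps front = true) ↔
      ∀ b ∈ breeze, ∃ tp ∈ traps.zip front, tp.1 = true ∧ b ∈ get_neighbors_pos tp.2 := by
  unfold get_breeze_checked_alt
  simp only [List.all_eq_true, List.any_eq_true,
    PySem.Set.contains_eq_listContains, List.contains_eq_mem, decide_eq_true_eq,
    PySem.Set.mem_ofList, List.mem_map, List.mem_filter]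
  constructor
  · rintro h b hb
    obtain ⟨n, hn, tp, ⟨htp, ht⟩, rfl⟩ := h b hb
    exact ⟨tp, htp, ht, (neigh_symm _ _).mp hn⟩
  · rintro h b hb
    obtain ⟨tp, htp, ht, hnb⟩ := h b hb
    exact ⟨tp.2, (neigh_symm _ _).mpr hnb, tp, ⟨htp, ht⟩, rfl⟩

-- ===== VERDICT (by name: the statement is the Claim_ definition above) =====
theorem get_breeze_checked_spec : Claim_equal_get_breeze_checked := by
  intro breeze traps front _ hpre
  unfold Spec_get_breeze_checked
  have h1 : (get_breeze_checked breeze traps front = true) ↔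
      (get_breeze_checked_alt breeze traps front = true) := by
    rw [A_char, B_char]
    exact forall₂_congr (fun b _ => hitA_iff traps front b hpre)
  exact Bool.eq_iff_iff.mpr h1
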